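-- pv_equiv track=rewrite | github.com/Sakauma/IRSAM2_Benchmark | src/irsam2_benchmark/analysis/diagnostics.py | _infer_oracle_box_method
-- ===== SOURCE A (Python) =====
-- def _infer_oracle_box_method(methods: set[str]) -> str | None:
--     preferred = [
--         method
--         for method in methods
--         if ("box_oracle" in method or "oracle_box" in method or "pretrained_box" in method)
--         and "tight" not in method
--         and "auto" not in method
--         and "point" not in method
--     ]
--     return sorted(preferred)[0] if preferred else None
-- ===== SOURCE B (Python) =====
-- def _infer_oracle_box_method(methods: set[str]) -> str | None:
--     best = None
--     for method in methods:
--         if (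
--             ("box_oracle" in method or "oracle_box" in method or "pretrained_box" in method)
--             and "tight" not in method
--             and "auto" not in method
--             and "point" not in method
--         ):
--             if best is None or method < best:
--                 best = method
--     return best
-- ===== Notes on version B (the rewrite author's own statement) =====
-- stated objective: simpler
-- what changed: Replaced the build-a-filtered-list-then-sort-and-take-head structure by a single pass that maintains a running lexicographic minimum over the matching methods, with no intermediate list and no sort.
import Mathlib
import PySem

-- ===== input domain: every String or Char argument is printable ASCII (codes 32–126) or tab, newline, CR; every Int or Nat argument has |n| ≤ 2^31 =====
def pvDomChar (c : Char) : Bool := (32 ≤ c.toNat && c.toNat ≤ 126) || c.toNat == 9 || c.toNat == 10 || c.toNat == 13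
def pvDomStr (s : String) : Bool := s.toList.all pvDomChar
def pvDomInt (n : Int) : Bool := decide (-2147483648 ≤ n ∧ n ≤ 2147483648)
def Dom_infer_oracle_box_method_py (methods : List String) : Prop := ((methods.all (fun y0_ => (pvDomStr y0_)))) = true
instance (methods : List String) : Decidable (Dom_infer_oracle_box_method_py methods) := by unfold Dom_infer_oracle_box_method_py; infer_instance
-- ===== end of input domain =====

-- B replaces filter-then-sort-then-head by a single pass keeping a running lexicographic minimum (simpler; no intermediate list, no sort).

-- shared predicate: the comprehension's condition in A, the if-condition in B
def pvOracleBoxPred (method : String) : Bool :=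
  (PySem.Str.isIn "box_oracle" method || PySem.Str.isIn "oracle_box" method
      || PySem.Str.isIn "pretrained_box" method)
    && !PySem.Str.isIn "tight" method
    && !PySem.Str.isIn "auto" method
    && !PySem.Str.isIn "point" method

-- ===== PORT A =====
def infer_oracle_box_method_py (methods : List String) : Option String :=
  let preferred := methods.filter (fun method => pvOracleBoxPred method)
  if preferred ≠ [] then (PySem.List.sorted preferred (fun x => x) false).head? else none

-- ===== PORT B =====
def infer_oracle_box_method_py_alt (methods : List String) : Option String :=
  methods.foldl
    (fun best method =>
      if pvOracleBoxPred method then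
        match best with
        | none => some method
        | some b => if method < b then some method else some b
      else best)
    none

-- ===== PRECONDITION & SPEC =====
def Spec_infer_oracle_box_method_py (methods : List String) (out : Option String) : Prop := out = infer_oracle_box_method_py_alt methods
instance (methods : List String) (out : Option String) : Decidable (Spec_infer_oracle_box_method_py methods out) := by unfold Spec_infer_oracle_box_method_py; infer_instance

-- ===== CLAIM (what is proved, stated in full; the proofs are below) =====
def Claim_equal_infer_oracle_box_method_py : Prop := ∀ (methods : List String), Dom_infer_oracle_box_method_py methods → Spec_infer_oracle_box_method_py methods (infer_oracle_box_method_py methods)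

-- ===== LEMMAS AND PROOFS =====

-- B's guarded fold equals the unguarded min-fold over the filtered list
theorem pv_fold_filter (ms : List String) (acc : Option String) :
    ms.foldl
      (fun best method =>
        if pvOracleBoxPred method then
          match best with
          | none => some method
          | some b => if method < b then some method else some b
        else best) acc
    = (ms.filter (fun m => pvOracleBoxPred m)).foldl
        (fun best method =>
          match best with
          | none => some method
          | some b => if method < b then some method else some b) acc := by
  induction ms generalizing acc with
  | nil => rfl
  | cons x t ih =>
    simp only [List.foldl_cons, List.filter_cons]
    by_cases hx : pvOracleBoxPred x = true
    · rw [if_pos hx]; simp only [hx]; exact ih _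
    · rw [if_neg hx]; simp only [hx]; exact ih _

-- the strict-< min fold computes the same VALUE as List.foldl min
theorem pv_fold_min (t : List String) (a : String) :
    t.foldl
      (fun best method =>
        match best with
        | none => some method
        | some b => if method < b then some method else some b) (some a)
    = some (t.foldl min a) := by
  induction t generalizing a with
  | nil => rfl
  | cons x s ih =>
    simp only [List.foldl_cons]
    by_cases h : x < a
    · rw [if_pos h, ih, min_eq_right (le_of_lt h)]
    · rw [if_neg h, ih, min_eq_left (not_lt.mp h)]

-- head of Python's sorted equals PySem's min? (first minimum; equal as VALUES)
theorem pv_head_sorted_eq_min? (xs : List String) :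
    (PySem.List.sorted xs (fun x => x) false).head? = PySem.List.min? xs (fun x => x) := by
  cases hxs : xs with
  | nil =>
    rw [(PySem.List.sorted_eq_nil_iff ([] : List String) (fun x => x) false).mpr rfl,
        (PySem.List.min?_eq_none_iff ([] : List String) (fun x => x)).mpr rfl]
    rfl
  | cons x t =>
    cases hs : PySem.List.sorted (x :: t) (fun x => x) false with
    | nil => exact absurd ((PySem.List.sorted_eq_nil_iff _ _ _).mp hs) (by simp)
    | cons m u =>
      cases hm : PySem.List.min? (x :: t) (fun x => x) with
      | none => exact absurd ((PySem.List.min?_eq_none_iff _ _).mp hm) (by simp)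
      | some v =>
        have hmem : m ∈ x :: t := by
          have hperm := PySem.List.sorted_perm (x :: t) (fun x => x) false
          exact hperm.mem_iff.mp (by rw [hs]; exact List.mem_cons_self)
        have hvmem : v ∈ x :: t := PySem.List.min?_mem hm
        have h1 : m ≤ v := PySem.List.key_head_sorted_le (x :: t) (fun x => x) hs v hvmem
        have h2 : v ≤ m := PySem.List.min?_isMin hm m hmem
        simp [le_antisymm h1 h2]

-- min? of a cons is the running-min fold (PySem) — combine to characterize B
theorem pv_alt_eq_min? (ms : List String) :
    infer_oracle_box_method_py_alt ms
      = PySem.List.min? (ms.filter (fun m => pvOracleBoxPred m)) (fun x => x) := by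
  unfold infer_oracle_box_method_py_alt
  rw [pv_fold_filter]
  cases hf : ms.filter (fun m => pvOracleBoxPred m) with
  | nil => rw [(PySem.List.min?_eq_none_iff ([] : List String) (fun x => x)).mpr rfl]; rfl
  | cons x t =>
    simp only [List.foldl_cons]
    rw [pv_fold_min, PySem.List.min?_id_cons]

-- ===== VERDICT (by name: the statement is the Claim_ definition above) =====
theorem infer_oracle_box_method_py_spec : Claim_equal_infer_oracle_box_method_py := by
  intro methods _
  unfold Spec_infer_oracle_box_method_py
  rw [pv_alt_eq_min?]
  unfold infer_oracle_box_method_py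
  by_cases h : methods.filter (fun m => pvOracleBoxPred m) = []
  · rw [h, (PySem.List.min?_eq_none_iff ([] : List String) (fun x => x)).mpr rfl]; rfl
  · simp only [h, ne_eq, not_false_eq_true, if_true]
    exact pv_head_sorted_eq_min? _
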